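-- pv_equiv track=rewrite | github.com/MarletteFunding/nestwatch-nvidia-nemo-agent | backend/app.py | _should_skip_llm
-- ===== SOURCE A (Python) =====
-- from typing import List, Dict, Any
--
-- def _should_skip_llm(events_data: List[Dict[str, Any]]) -> bool:
--     """Determine if LLM should be skipped based on policy"""
--     # Count priorities
--     p1_count = sum(1 for e in events_data if e.get('priority') == 'P1')
--     p2_count = sum(1 for e in events_data if e.get('priority') == 'P2')
--     p3_count = sum(1 for e in events_data if e.get('priority') == 'P3')
--
--     # Skip LLM if no P1s and <= 2 P2s
--     if p1_count == 0 and p2_count <= 2: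
--         return True
--
--     # Skip LLM if all events are P3
--     if p1_count == 0 and p2_count == 0 and p3_count > 0:
--         return True
--
--     return False
-- ===== SOURCE B (Python) =====
-- def _should_skip_llm(events_data):
--     """Determine if LLM should be skipped based on policy"""
--     p2_count = 0
--     for e in events_data:
--         pr = e.get('priority')
--         if pr == 'P1':
--             return False
--         if pr == 'P2':
--             p2_count += 1
--             if p2_count > 2:
--                 return False
--     return True
-- ===== Notes on version B (the rewrite author's own statement) =====
-- stated objective: simpler
-- what changed: Replaced three full counting passes plus two guard checks by one short-circuiting loop that returns False at the first P1 or the third P2 and drops the redundant P3 count (A's second condition is subsumed by its first).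
import Mathlib
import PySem

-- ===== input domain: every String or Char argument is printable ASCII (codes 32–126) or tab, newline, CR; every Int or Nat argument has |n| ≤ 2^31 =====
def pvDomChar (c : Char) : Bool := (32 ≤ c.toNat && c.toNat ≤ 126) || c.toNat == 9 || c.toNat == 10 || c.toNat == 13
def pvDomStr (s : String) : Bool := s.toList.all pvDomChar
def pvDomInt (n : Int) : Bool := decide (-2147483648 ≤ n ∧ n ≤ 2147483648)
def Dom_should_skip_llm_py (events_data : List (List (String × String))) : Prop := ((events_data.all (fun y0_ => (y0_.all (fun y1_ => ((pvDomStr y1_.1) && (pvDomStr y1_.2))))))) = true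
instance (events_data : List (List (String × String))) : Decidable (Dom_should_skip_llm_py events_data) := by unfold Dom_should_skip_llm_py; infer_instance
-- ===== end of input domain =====

-- B replaces A's three counting passes (and a redundant P3 condition) by one short-circuiting
-- pass; objective: simpler. Return values are proved equal on all inputs.

-- e.get('priority'): first-match lookup in the association list (exact for Python dicts,
-- whose keys are unique).
def pvGetPriority : List (String × String) → Option String
  | [] => none
  | (k, v) :: rest => if k == "priority" then some v else pvGetPriority rest

-- ===== PORT A =====
def should_skip_llm_py (events_data : List (List (String × String))) : Bool :=
  let p1_count : Int := events_data.foldl (fun n e => if pvGetPriority e == some "P1" then n + 1 else n) 0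
  let p2_count : Int := events_data.foldl (fun n e => if pvGetPriority e == some "P2" then n + 1 else n) 0
  let p3_count : Int := events_data.foldl (fun n e => if pvGetPriority e == some "P3" then n + 1 else n) 0
  if p1_count = 0 ∧ p2_count ≤ 2 then true
  else if p1_count = 0 ∧ p2_count = 0 ∧ p3_count > 0 then true
  else false

-- ===== PORT B =====
def should_skip_llm_py_alt_go : List (List (String × String)) → Int → Bool
  | [], _ => true
  | e :: rest, p2_count =>
    let pr := pvGetPriority e
    if pr == some "P1" then false
    else if pr == some "P2" then
      if p2_count + 1 > 2 then false else should_skip_llm_py_alt_go rest (p2_count + 1)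
    else should_skip_llm_py_alt_go rest p2_count

def should_skip_llm_py_alt (events_data : List (List (String × String))) : Bool :=
  should_skip_llm_py_alt_go events_data 0

-- ===== PRECONDITION & SPEC =====
def Spec_should_skip_llm_py (events_data : List (List (String × String))) (out : Bool) : Prop := out = should_skip_llm_py_alt events_data
instance (events_data : List (List (String × String))) (out : Bool) : Decidable (Spec_should_skip_llm_py events_data out) := by unfold Spec_should_skip_llm_py; infer_instance

-- ===== CLAIM (what is proved, stated in full; the proofs are below) =====
def Claim_equal_should_skip_llm_py : Prop := ∀ (events_data : List (List (String × String))), Dom_should_skip_llm_py events_data → Spec_should_skip_llm_py events_data (should_skip_llm_py events_data)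

-- ===== LEMMAS AND PROOFS =====

def pvCount (tag : String) : List (List (String × String)) → Int
  | [] => 0
  | e :: rest => (if pvGetPriority e == some tag then 1 else 0) + pvCount tag rest

theorem pvCount_foldl (tag : String) (l : List (List (String × String))) (init : Int) :
    l.foldl (fun n e => if pvGetPriority e == some tag then n + 1 else n) init
      = init + pvCount tag l := by
  induction l generalizing init with
  | nil => simp [pvCount]
  | cons e rest ih =>
    simp only [pvCount, List.foldl_cons]
    rw [ih]
    split_ifs <;> ring

theorem pvCount_nonneg (tag : String) (l : List (List (String × String))) : 0 ≤ pvCount tag l := by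
  induction l with
  | nil => simp [pvCount]
  | cons e rest ih =>
    simp only [pvCount]
    split_ifs <;> omega

-- characterisation of B's loop (invariant: the running count stays ≤ 2)
theorem alt_go_eq (l : List (List (String × String))) (p2 : Int) (hp2 : p2 ≤ 2) :
    should_skip_llm_py_alt_go l p2
      = (decide (pvCount "P1" l = 0) && decide (p2 + pvCount "P2" l ≤ 2)) := by
  induction l generalizing p2 with
  | nil =>
    simp [should_skip_llm_py_alt_go, pvCount]
    omega
  | cons e rest ih =>
    have hn1 := pvCount_nonneg "P1" rest
    have hn2 := pvCount_nonneg "P2" rest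
    simp only [should_skip_llm_py_alt_go, pvCount]
    by_cases hP1 : (pvGetPriority e == some "P1") = true
    · rw [if_pos hP1]
      simp [hP1]
      omega
    · rw [if_neg hP1]
      by_cases hP2 : (pvGetPriority e == some "P2") = true
      · rw [if_pos hP2]
        by_cases hgt : p2 + 1 > 2
        · rw [if_pos hgt]
          simp [hP1, hP2]
          omega
        · rw [if_neg hgt]
          rw [ih (p2 + 1) (by omega)]
          simp [hP1, hP2, add_assoc]
      · rw [if_neg hP2]
        rw [ih p2 hp2]
        simp [hP1, hP2]

-- ===== VERDICT (by name: the statement is the Claim_ definition above) =====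
theorem should_skip_llm_py_spec : Claim_equal_should_skip_llm_py := by
  intro l _
  unfold Spec_should_skip_llm_py should_skip_llm_py should_skip_llm_py_alt
  rw [alt_go_eq l 0 (by omega)]
  simp only [pvCount_foldl, zero_add]
  have hn2 := pvCount_nonneg "P2" l
  split_ifs with h1 h2
  · simp [h1.1, h1.2]
  · exact absurd ⟨h2.1, by omega⟩ h1
  · simp only [Bool.false_eq, Bool.and_eq_false_iff, decide_eq_false_iff_not]
    by_cases hp1 : pvCount "P1" l = 0
    · right; intro hle; exact h1 ⟨hp1, hle⟩
    · left; exact hp1
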